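-- pv_equiv track=rewrite | github.com/unanmed/ginka-generator | ginka/generator/loss.py | get_not_allowed
-- ===== SOURCE A (Python) =====
-- CLASS_NUM = 32
--
-- ILLEGAL_MAX_NUM = 30
--
-- def get_not_allowed(classes: list[int], include_illegal=False):
--     res = list()
--     for num in range(0, CLASS_NUM):
--         if not num in classes:
--             if num > ILLEGAL_MAX_NUM:
--                 if include_illegal:
--                     res.append(num)
--             else:
--                 res.append(num)
--
--     return res
-- ===== SOURCE B (Python) =====
-- CLASS_NUM = 32
--
-- ILLEGAL_MAX_NUM = 30
--
-- def get_not_allowed(classes: list[int], include_illegal=False):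
--     # Gap-scan: sort the distinct present classes in range, then emit the
--     # runs of missing values between consecutive present ones.
--     upper = CLASS_NUM if include_illegal else ILLEGAL_MAX_NUM + 1
--     present = sorted(set(c for c in classes if 0 <= c < upper))
--     res = []
--     prev = 0
--     for p in present:
--         res.extend(range(prev, p))
--         prev = p + 1
--     res.extend(range(prev, upper))
--     return res
-- ===== Notes on version B (the rewrite author's own statement) =====
-- stated objective: alternative
-- what changed: Instead of testing each of the 32 candidate values for membership in the classes list, B sorts the distinct in-range present classes once and emits the gaps (runs of absent values) between consecutive present ones in a single sweep; the per-candidate O(n) membership scan and the num > ILLEGAL_MAX_NUM branch disappear.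
import Mathlib
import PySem

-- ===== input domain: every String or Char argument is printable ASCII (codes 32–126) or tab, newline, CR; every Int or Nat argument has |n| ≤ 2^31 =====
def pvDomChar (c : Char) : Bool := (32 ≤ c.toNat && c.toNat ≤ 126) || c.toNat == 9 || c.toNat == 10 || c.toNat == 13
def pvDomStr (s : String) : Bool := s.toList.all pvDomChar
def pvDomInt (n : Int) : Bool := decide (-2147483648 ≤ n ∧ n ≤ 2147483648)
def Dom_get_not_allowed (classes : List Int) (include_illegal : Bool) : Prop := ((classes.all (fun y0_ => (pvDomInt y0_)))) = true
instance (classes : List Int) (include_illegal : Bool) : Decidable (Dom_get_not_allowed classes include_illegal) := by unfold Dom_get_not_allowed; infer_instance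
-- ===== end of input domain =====

-- B replaces A's per-candidate membership loop by a gap-scan: it sorts the distinct
-- in-range present classes once and emits the runs of absent values between them.

-- ===== PORT A =====
def get_not_allowed (classes : List Int) (include_illegal : Bool) : List Int :=
  (PySem.List.pyRange 0 32 1).foldl (fun res num =>
    if !(classes.contains num) then
      if num > 30 then
        if include_illegal then res ++ [num] else res
      else res ++ [num]
    else res) []

-- ===== PORT B =====
def get_not_allowed_alt (classes : List Int) (include_illegal : Bool) : List Int :=
  let upper : Int := if include_illegal then 32 else 30 + 1
  let present := PySem.List.sorted
    (PySem.Set.ofList (classes.filter (fun c => 0 ≤ c && c < upper))) (fun x => x) false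
  let st := present.foldl
    (fun (st : Int × List Int) p => (p + 1, st.2 ++ PySem.List.pyRange st.1 p 1)) (0, [])
  st.2 ++ PySem.List.pyRange st.1 upper 1

-- ===== PRECONDITION & SPEC =====
def Spec_get_not_allowed (classes : List Int) (include_illegal : Bool) (out : List Int) : Prop := out = get_not_allowed_alt classes include_illegal
instance (classes : List Int) (include_illegal : Bool) (out : List Int) : Decidable (Spec_get_not_allowed classes include_illegal out) := by unfold Spec_get_not_allowed; infer_instance

-- ===== CLAIM =====
def Claim_equal_get_not_allowed : Prop := ∀ (classes : List Int) (include_illegal : Bool), Dom_get_not_allowed classes include_illegal → Spec_get_not_allowed classes include_illegal (get_not_allowed classes include_illegal)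

-- ===== LEMMAS AND PROOFS =====

-- A's loop is a filter of the range 0..31 by "absent from classes and (≤ 30 or include_illegal)"
theorem getA_eq_filter (classes : List Int) (inc : Bool) :
    get_not_allowed classes inc =
      (PySem.List.pyRange 0 32 1).filter
        (fun num => !(classes.contains num) && (decide (num ≤ 30) || inc)) := by
  unfold get_not_allowed
  rw [show (fun (res : List Int) num =>
      if !(classes.contains num) then
        if num > 30 then
          if inc then res ++ [num] else res
        else res ++ [num]
      else res)
    = (fun res num =>
        if (!(classes.contains num) && (decide (num ≤ 30) || inc)) = true
        then res ++ [num] else res) from by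
      funext res num
      by_cases h1 : num ∈ classes
      · simp [h1]
      · by_cases h2 : (30 : Int) < num
        · cases inc <;> simp [h1, h2, not_le.mpr h2]
        · cases inc <;> simp [h1, h2, not_lt.mp h2]]
  rw [PySem.List.foldl_append_if_eq_filter]
  simp

-- gap-scan invariant: the emitted gaps are exactly the filter of the remaining range
theorem gaps_eq_filter (upper : Int) :
    ∀ (ps : List Int) (prev : Int) (res : List Int),
      ps.Pairwise (· < ·) →
      (∀ x ∈ ps, prev ≤ x ∧ x < upper) →
      (let st := ps.foldl
          (fun (st : Int × List Int) p => (p + 1, st.2 ++ PySem.List.pyRange st.1 p 1)) (prev, res)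
       st.2 ++ PySem.List.pyRange st.1 upper 1)
        = res ++ (PySem.List.pyRange prev upper 1).filter (fun x => !(ps.contains x)) := by
  intro ps
  induction ps with
  | nil => intro prev res _ _; simp
  | cons p ps ih =>
    intro prev res hpw hmem
    have hp := hmem p (List.mem_cons_self)
    have htail : ∀ x ∈ ps, p < x := by
      intro x hx; exact (List.pairwise_cons.mp hpw).1 x hx
    simp only [List.foldl_cons]
    rw [ih (p + 1) (res ++ PySem.List.pyRange prev p 1) (List.pairwise_cons.mp hpw).2
        (fun x hx => ⟨by have := htail x hx; omega, (hmem x (List.mem_cons_of_mem _ hx)).2⟩)]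
    rw [List.append_assoc]
    congr 1
    -- split the range at p
    rw [PySem.List.pyRange_one_append prev p upper hp.1 (le_of_lt hp.2),
        PySem.List.pyRange_one_cons hp.2, List.filter_append, List.filter_cons]
    have h1 : (PySem.List.pyRange prev p 1).filter (fun x => !((p :: ps).contains x))
        = PySem.List.pyRange prev p 1 := by
      apply List.filter_eq_self.mpr
      intro x hx
      have hxr := (PySem.List.mem_pyRange_one).mp hx
      simp only [List.contains_cons, Bool.not_eq_eq_eq_not, Bool.not_true, Bool.or_eq_false_iff]
      constructor
      · simp; omega
      · simp only [List.contains_eq_mem, decide_eq_false_iff_not]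
        intro hc; have := htail x hc; omega
    have h2 : ((p :: ps).contains p) = true := by simp
    have h3 : (PySem.List.pyRange (p+1) upper 1).filter (fun x => !((p :: ps).contains x))
        = (PySem.List.pyRange (p+1) upper 1).filter (fun x => !(ps.contains x)) := by
      apply List.filter_congr
      intro x hx
      have hxr := (PySem.List.mem_pyRange_one).mp hx
      simp only [List.contains_cons]
      have : (x == p) = false := by simp; omega
      rw [this]; simp
    rw [h1, h3, h2]
    simp

-- B is a filter of the range 0..upper-1 by "absent from classes"
theorem getB_eq_filter (classes : List Int) (inc : Bool) :
    get_not_allowed_alt classes inc =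
      (PySem.List.pyRange 0 (if inc then (32 : Int) else 31) 1).filter
        (fun num => !(classes.contains num)) := by
  unfold get_not_allowed_alt
  have hupper : (if inc then (32 : Int) else 30 + 1) = (if inc then (32 : Int) else 31) := by
    cases inc <;> norm_num
  rw [hupper]
  set upper : Int := if inc then (32 : Int) else 31 with hu
  set present := PySem.List.sorted
    (PySem.Set.ofList (classes.filter (fun c => 0 ≤ c && c < upper))) (fun x => x) false with hpres
  have hmemp : ∀ x, x ∈ present ↔ (x ∈ classes ∧ 0 ≤ x ∧ x < upper) := by
    intro x
    rw [hpres, PySem.List.mem_sorted, PySem.Set.mem_ofList, List.mem_filter]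
    simp
  have hpw : present.Pairwise (· < ·) := PySem.List.sorted_ofList_pairwise_lt _
  rw [gaps_eq_filter upper present 0 [] hpw
      (fun x hx => ⟨((hmemp x).mp hx).2.1, ((hmemp x).mp hx).2.2⟩)]
  rw [List.nil_append]
  apply List.filter_congr
  intro x hx
  have hxr := (PySem.List.mem_pyRange_one).mp hx
  simp [hmemp x, hxr.1, hxr.2]

-- ===== VERDICT =====
theorem get_not_allowed_spec : Claim_equal_get_not_allowed := by
  intro classes inc _
  unfold Spec_get_not_allowed
  rw [getA_eq_filter, getB_eq_filter]
  cases inc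
  · have h32 : PySem.List.pyRange 0 32 1 = PySem.List.pyRange 0 31 1 ++ [31] := by
      rw [show (32 : Int) = 31 + 1 from by norm_num,
          PySem.List.pyRange_one_succ_right (by norm_num : (0:Int) ≤ 31)]
    rw [h32, List.filter_append]
    have h31 : (List.filter (fun num => !(classes.contains num) && (decide (num ≤ 30) || false)) [(31:Int)]) = [] := by
      simp
    rw [h31, List.append_nil, if_neg (by simp)]
    apply List.filter_congr
    intro x hx
    rw [PySem.List.mem_pyRange_one] at hx
    simp [show x ≤ 30 by omega]
  · simp
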